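-- pv_equiv track=rewrite | github.com/alex-43/adventofcode | day2/run.py | maxNumbers
-- ===== SOURCE A (Python) =====
-- from typing import List, Dict, Tuple
-- from functools import reduce
--
-- def maxNumbers(dictList: List[Dict[str, int]]):
--
--     all = {}
--
--     for d in dictList:
--
--         for key in ["blue", "red", "green"]:
--             if key in d:
--                 if not key in all or d[key] > all[key]:
--                     all[key] = d[key]
--
--     return reduce(lambda a, b : a * b, all.values())
-- ===== SOURCE B (Python) =====
-- from functools import reduce
--
-- def maxNumbers(dictList):
--     maxima = []
--     for key in ["blue", "red", "green"]:
--         vals = [d[key] for d in dictList if key in d]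
--         if vals:
--             maxima.append(max(vals))
--     return reduce(lambda a, b: a * b, maxima)
-- ===== Notes on version B (the rewrite author's own statement) =====
-- stated objective: idiomatic
-- what changed: B computes each color's maximum independently with max() over a comprehension per key (transposing the loops and dropping the running-max dict), then multiplies the collected maxima with reduce; A threads a running-max dict through a single scan over the dicts.
import Mathlib
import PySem

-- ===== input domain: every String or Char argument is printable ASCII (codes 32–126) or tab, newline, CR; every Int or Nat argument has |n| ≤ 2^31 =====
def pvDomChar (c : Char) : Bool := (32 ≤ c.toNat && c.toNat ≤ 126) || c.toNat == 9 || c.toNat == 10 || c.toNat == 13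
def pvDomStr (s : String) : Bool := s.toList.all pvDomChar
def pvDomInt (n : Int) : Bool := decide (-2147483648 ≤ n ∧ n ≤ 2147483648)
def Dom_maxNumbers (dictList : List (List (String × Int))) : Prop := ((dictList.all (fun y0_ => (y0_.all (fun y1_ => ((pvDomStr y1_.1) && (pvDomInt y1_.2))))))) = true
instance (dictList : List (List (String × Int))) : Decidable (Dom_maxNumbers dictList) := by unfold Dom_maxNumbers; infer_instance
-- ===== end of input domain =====

-- B computes each color's maximum independently (per-key comprehension + max) instead of
-- threading a running-max dict through one scan; same cost, more idiomatic decomposition.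


-- ===== PORT A =====
-- 'key in d' / 'd[key]' on an input dict = first-match lookup on the association list (PySem.Dict.mk)
def stepKey (d : List (String × Int)) (all : PySem.Dict String Int) (key : String) : PySem.Dict String Int :=
  match (PySem.Dict.mk d).get? key with
  | none => all                                -- 'if key in d' fails
  | some v =>
    match all.get? key with                    -- 'not key in all or d[key] > all[key]'
    | none => all.insert key v
    | some m => if v > m then all.insert key v else all

def stepDict (all : PySem.Dict String Int) (d : List (String × Int)) : PySem.Dict String Int :=
  ["blue", "red", "green"].foldl (stepKey d) all

def maxNumbers (dictList : List (List (String × Int))) : Int :=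
  let all := dictList.foldl stepDict PySem.Dict.empty
  match all.values with
  | [] => 0                                    -- Python: reduce on an empty iterable raises TypeError; excluded by Pre_
  | v :: rest => rest.foldl (fun a b => a * b) v

-- ===== PORT B =====
def maxNumbers_alt (dictList : List (List (String × Int))) : Int :=
  let maxima := ["blue", "red", "green"].foldl (fun acc key =>
    -- vals = [d[key] for d in dictList if key in d]  (filter by membership + lookup = filterMap of first-match lookup)
    let vals := dictList.filterMap (fun d => (PySem.Dict.mk d).get? key)
    match PySem.List.max? vals (fun x => x) with -- 'if vals: maxima.append(max(vals))'
    | none => acc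
    | some m => acc ++ [m]) []
  match maxima with
  | [] => 0                                    -- reduce on empty raises TypeError; excluded by Pre_
  | v :: rest => rest.foldl (fun a b => a * b) v

-- ===== PRECONDITION & SPEC =====
-- Pre_ excludes exactly the inputs where no dict contains any of the three colors: there
-- reduce() gets an empty iterable and BOTH A and B raise TypeError.
def Pre_maxNumbers (dictList : List (List (String × Int))) : Prop :=
  ∃ d ∈ dictList, ∃ k ∈ (["blue", "red", "green"] : List String), ((PySem.Dict.mk d).get? k).isSome = true
instance (dictList : List (List (String × Int))) : Decidable (Pre_maxNumbers dictList) := by unfold Pre_maxNumbers; infer_instance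
def pvWitness_maxNumbers : (List (List (String × Int))) := [[("blue", 3)]]
def Spec_maxNumbers (dictList : List (List (String × Int))) (out : Int) : Prop := out = maxNumbers_alt dictList
instance (dictList : List (List (String × Int))) (out : Int) : Decidable (Spec_maxNumbers dictList out) := by unfold Spec_maxNumbers; infer_instance

-- ===== CLAIM (what is proved, stated in full; the proofs are below) =====
def Claim_equal_maxNumbers : Prop := ∀ (dictList : List (List (String × Int))), Dom_maxNumbers dictList → Pre_maxNumbers dictList → Spec_maxNumbers dictList (maxNumbers dictList)

-- ===== LEMMAS AND PROOFS =====

-- the running-max accumulator of A's dict entry for one key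
def acc1 (o : Option Int) (v : Int) : Option Int :=
  some (match o with | none => v | some m => max m v)

def collectK (dictList : List (List (String × Int))) (k : String) : List Int :=
  dictList.filterMap (fun d => (PySem.Dict.mk d).get? k)

-- running max over a list, as an option fold
theorem foldl_acc1_some (t : List Int) : ∀ m : Int, t.foldl acc1 (some m) = some (t.foldl max m) := by
  induction t with
  | nil => intro m; rfl
  | cons v t ih => intro m; simp [List.foldl, acc1, ih]

theorem max?_eq_foldl_acc1 (vs : List Int) :
    PySem.List.max? vs (fun x => x) = vs.foldl acc1 none := by
  cases vs with
  | nil => simp [PySem.List.max?_eq_none_iff]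
  | cons v t => rw [PySem.List.max?_id_cons]; simp [List.foldl, acc1, foldl_acc1_some]

theorem stepKey_get_self (d : List (String × Int)) (all : PySem.Dict String Int) (k : String) :
    (stepKey d all k).get? k = ((PySem.Dict.mk d).get? k).elim (all.get? k) (acc1 (all.get? k)) := by
  unfold stepKey
  cases hd : (PySem.Dict.mk d).get? k with
  | none => rfl
  | some v =>
    cases ha : all.get? k with
    | none => simp [acc1, PySem.Dict.get?_insert_self]
    | some m =>
      by_cases h : v > m
      · simp [h, acc1, PySem.Dict.get?_insert_self]
        omega
      · simp [h, acc1, ha]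
        omega

theorem stepKey_get_ne (d : List (String × Int)) (all : PySem.Dict String Int) (k k' : String)
    (h : k' ≠ k) : (stepKey d all k).get? k' = all.get? k' := by
  unfold stepKey
  cases hd : (PySem.Dict.mk d).get? k with
  | none => rfl
  | some v =>
    cases ha : all.get? k with
    | none => simp [PySem.Dict.get?_insert, h]
    | some m =>
      by_cases hv : v > m
      · simp [hv, PySem.Dict.get?_insert, h]
      · simp [hv]

-- effect of one dict on each color entry
theorem stepDict_get (all : PySem.Dict String Int) (d : List (String × Int)) (k : String)
    (hk : k ∈ (["blue", "red", "green"] : List String)) :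
    (stepDict all d).get? k = (collectK [d] k).foldl acc1 (all.get? k) := by
  simp only [List.mem_cons, List.not_mem_nil, or_false] at hk
  unfold stepDict collectK
  rcases hk with h | h | h <;> subst h <;>
    simp only [List.foldl, List.filterMap] <;>
    cases hd : (PySem.Dict.mk d).get? _ <;>
    simp_all [stepKey_get_self, stepKey_get_ne, List.foldl, Option.elim]

theorem stepKey_mem_keys (d : List (String × Int)) (all : PySem.Dict String Int) (key k' : String)
    (h : k' ∈ (stepKey d all key).keys) : k' = key ∨ k' ∈ all.keys := by
  unfold stepKey at h
  split at h
  · exact Or.inr h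
  · split at h
    · rw [PySem.Dict.mem_keys_insert] at h; exact h
    · split at h
      · rw [PySem.Dict.mem_keys_insert] at h; exact h
      · exact Or.inr h

theorem stepKey_nodup (d : List (String × Int)) (all : PySem.Dict String Int) (key : String)
    (h : all.keys.Nodup) : (stepKey d all key).keys.Nodup := by
  unfold stepKey
  split
  · exact h
  · split
    · exact PySem.Dict.nodup_keys_insert _ _ _ h
    · split
      · exact PySem.Dict.nodup_keys_insert _ _ _ h
      · exact h

theorem stepDict_mem_keys (all : PySem.Dict String Int) (d : List (String × Int)) (k : String)
    (h : k ∈ (stepDict all d).keys) : k ∈ (["blue", "red", "green"] : List String) ∨ k ∈ all.keys := by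
  unfold stepDict at h
  simp only [List.foldl] at h
  rcases stepKey_mem_keys _ _ _ _ h with rfl | h
  · simp
  rcases stepKey_mem_keys _ _ _ _ h with rfl | h
  · simp
  rcases stepKey_mem_keys _ _ _ _ h with rfl | h
  · simp
  exact Or.inr h

theorem stepDict_nodup (all : PySem.Dict String Int) (d : List (String × Int))
    (h : all.keys.Nodup) : (stepDict all d).keys.Nodup := by
  unfold stepDict
  simp only [List.foldl]
  exact stepKey_nodup _ _ _ (stepKey_nodup _ _ _ (stepKey_nodup _ _ _ h))

theorem foldl_stepDict_get (l : List (List (String × Int))) (k : String)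
    (hk : k ∈ (["blue", "red", "green"] : List String)) :
    ∀ all : PySem.Dict String Int,
      (l.foldl stepDict all).get? k = (collectK l k).foldl acc1 (all.get? k) := by
  induction l with
  | nil => intro all; rfl
  | cons d t ih =>
    intro all
    have : collectK (d :: t) k = collectK [d] k ++ collectK t k := by
      unfold collectK; cases hd : (PySem.Dict.mk d).get? k <;> simp [List.filterMap, hd]
    rw [List.foldl_cons, ih, this, List.foldl_append, stepDict_get _ _ _ hk]

theorem foldl_stepDict_keys (l : List (List (String × Int))) :
    ∀ all : PySem.Dict String Int, all.keys.Nodup →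
      (l.foldl stepDict all).keys.Nodup ∧
      (∀ k ∈ (l.foldl stepDict all).keys, k ∈ (["blue", "red", "green"] : List String) ∨ k ∈ all.keys) := by
  induction l with
  | nil => intro all h; exact ⟨h, fun k hk => Or.inr hk⟩
  | cons d t ih =>
    intro all h
    obtain ⟨h1, h2⟩ := ih (stepDict all d) (stepDict_nodup all d h)
    refine ⟨h1, fun k hk => ?_⟩
    rcases h2 k hk with h' | h'
    · exact Or.inl h'
    · exact stepDict_mem_keys all d k h'

-- product over a nodup key list drawn from the three colors
theorem prod_keys3 (ks : List String) (g : String → Int) (hnd : ks.Nodup)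
    (hsub : ∀ k ∈ ks, k ∈ (["blue", "red", "green"] : List String)) :
    (ks.map g).prod =
      (if "blue" ∈ ks then g "blue" else 1) * (if "red" ∈ ks then g "red" else 1) *
        (if "green" ∈ ks then g "green" else 1) := by
  induction ks with
  | nil => simp
  | cons k t ih =>
    have hk := hsub k (List.mem_cons_self)
    have hnt : t.Nodup := hnd.of_cons
    have hkt : k ∉ t := (List.nodup_cons.mp hnd).1
    have hst : ∀ k' ∈ t, k' ∈ (["blue", "red", "green"] : List String) := fun k' h' => hsub k' (List.mem_cons_of_mem _ h')
    have iht := ih hnt hst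
    simp only [List.mem_cons, List.not_mem_nil, or_false] at hk
    rcases hk with h | h | h <;> subst h <;>
      simp_all [List.mem_cons] <;> split_ifs <;> simp_all <;> ring

theorem reduce_eq_prod (v : Int) (rest : List Int) :
    rest.foldl (fun a b => a * b) v = (v :: rest).prod := by
  simp only [List.prod_cons]
  induction rest generalizing v with
  | nil => simp
  | cons b t ih =>
    simp only [List.foldl_cons, List.prod_cons]
    rw [ih (v * b), mul_assoc]

-- the per-color best value, as an option
def bKf (dictList : List (List (String × Int))) (k : String) : Option Int :=
  (collectK dictList k).foldl acc1 none

theorem bKf_eq_none_iff (dictList : List (List (String × Int))) (k : String) :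
    bKf dictList k = none ↔ collectK dictList k = [] := by
  unfold bKf
  cases collectK dictList k with
  | nil => simp
  | cons v t => simp [List.foldl, acc1, foldl_acc1_some]

theorem pre_bKf (dictList : List (List (String × Int))) (h : Pre_maxNumbers dictList) :
    ¬ (bKf dictList "blue" = none ∧ bKf dictList "red" = none ∧ bKf dictList "green" = none) := by
  rintro ⟨hb, hr, hg⟩
  obtain ⟨d, hd, k, hk, hs⟩ := h
  simp only [List.mem_cons, List.not_mem_nil, or_false] at hk
  have : ∀ k', bKf dictList k' = none → ¬ ((PySem.Dict.mk d).get? k').isSome = true := by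
    intro k' h' hs'
    rw [bKf_eq_none_iff] at h'
    unfold collectK at h'
    rw [List.filterMap_eq_nil_iff] at h'
    rw [h' d hd] at hs'
    simp at hs'
  rcases hk with rfl | rfl | rfl
  · exact this _ hb hs
  · exact this _ hr hs
  · exact this _ hg hs

theorem A_closed (dictList : List (List (String × Int))) (hpre : Pre_maxNumbers dictList) :
    maxNumbers dictList =
      (bKf dictList "blue").getD 1 * (bKf dictList "red").getD 1 * (bKf dictList "green").getD 1 := by
  have h0 : (PySem.Dict.empty : PySem.Dict String Int).keys.Nodup := by
    simp [PySem.Dict.keys_empty]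
  obtain ⟨hnd, hsub⟩ := foldl_stepDict_keys dictList PySem.Dict.empty h0
  set D := dictList.foldl stepDict (PySem.Dict.empty : PySem.Dict String Int) with hDdef
  have hget : ∀ k ∈ (["blue", "red", "green"] : List String), D.get? k = bKf dictList k := by
    intro k hk
    rw [hDdef, foldl_stepDict_get _ _ hk, PySem.Dict.get?_empty]
    rfl
  have hsub' : ∀ k ∈ D.keys, k ∈ (["blue", "red", "green"] : List String) := by
    intro k hk
    rcases hsub k hk with h | h
    · exact h
    · rw [PySem.Dict.keys_empty] at h; simp at h
  have hfac : ∀ k ∈ (["blue", "red", "green"] : List String),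
      (if k ∈ D.keys then D.getD k 1 else 1) = (bKf dictList k).getD 1 := by
    intro k hk
    by_cases hm : k ∈ D.keys
    · rw [if_pos hm, PySem.Dict.getD_eq_get?_getD, hget k hk]
    · rw [if_neg hm, ← hget k hk,
        (PySem.Dict.get?_eq_none_iff_not_mem_keys _ _).mpr hm]
      rfl
  have hvals : D.values = D.keys.map (fun k => D.getD k 1) :=
    PySem.Dict.values_eq_map_keys D hnd 1
  have hprod : D.values.prod =
      (bKf dictList "blue").getD 1 * (bKf dictList "red").getD 1 * (bKf dictList "green").getD 1 := by
    rw [hvals, prod_keys3 _ _ hnd hsub',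
      hfac "blue" (by simp), hfac "red" (by simp), hfac "green" (by simp)]
  have hne : D.values ≠ [] := by
    obtain ⟨k, hk3, hks⟩ : ∃ k ∈ (["blue", "red", "green"] : List String),
        (bKf dictList k).isSome = true := by
      have := pre_bKf dictList hpre
      cases hb : bKf dictList "blue" with
      | some v => exact ⟨"blue", by simp, by simp [hb]⟩
      | none =>
        cases hr : bKf dictList "red" with
        | some v => exact ⟨"red", by simp, by simp [hr]⟩
        | none =>
          cases hg : bKf dictList "green" with
          | some v => exact ⟨"green", by simp, by simp [hg]⟩
          | none => exact absurd ⟨hb, hr, hg⟩ this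
    have hmem : k ∈ D.keys := by
      by_contra hm
      rw [← hget k hk3, (PySem.Dict.get?_eq_none_iff_not_mem_keys _ _).mpr hm] at hks
      simp at hks
    rw [hvals]
    intro hcon
    rw [List.map_eq_nil_iff] at hcon
    rw [hcon] at hmem
    simp at hmem
  rw [← hprod]
  show (match D.values with
    | [] => (0 : Int)
    | v :: rest => rest.foldl (fun a b => a * b) v) = _
  cases hv : D.values with
  | nil => exact absurd hv hne
  | cons v rest => simp only []; rw [reduce_eq_prod, ← hv]

theorem B_closed (dictList : List (List (String × Int))) (hpre : Pre_maxNumbers dictList) :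
    maxNumbers_alt dictList =
      (bKf dictList "blue").getD 1 * (bKf dictList "red").getD 1 * (bKf dictList "green").getD 1 := by
  have hne := pre_bKf dictList hpre
  unfold maxNumbers_alt
  simp only [List.foldl, max?_eq_foldl_acc1]
  have hb' : dictList.filterMap (fun d => (PySem.Dict.mk d).get? "blue") = collectK dictList "blue" := rfl
  have hr' : dictList.filterMap (fun d => (PySem.Dict.mk d).get? "red") = collectK dictList "red" := rfl
  have hg' : dictList.filterMap (fun d => (PySem.Dict.mk d).get? "green") = collectK dictList "green" := rfl
  rw [hb', hr', hg']
  show (match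
      (match bKf dictList "green" with
        | none =>
          (match bKf dictList "red" with
            | none => (match bKf dictList "blue" with | none => ([] : List Int) | some m => [] ++ [m])
            | some m => (match bKf dictList "blue" with | none => ([] : List Int) | some m => [] ++ [m]) ++ [m])
        | some m =>
          (match bKf dictList "red" with
            | none => (match bKf dictList "blue" with | none => ([] : List Int) | some m => [] ++ [m])
            | some m => (match bKf dictList "blue" with | none => ([] : List Int) | some m => [] ++ [m]) ++ [m]) ++ [m]) with
    | [] => (0 : Int)
    | v :: rest => rest.foldl (fun a b => a * b) v) = _
  cases hb : bKf dictList "blue" with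
  | none =>
    cases hr : bKf dictList "red" with
    | none =>
      cases hg : bKf dictList "green" with
      | none => exact absurd ⟨hb, hr, hg⟩ hne
      | some g => simp [List.foldl]
    | some r =>
      cases hg : bKf dictList "green" with
      | none => simp [List.foldl]
      | some g => simp [List.foldl]
  | some b =>
    cases hr : bKf dictList "red" with
    | none =>
      cases hg : bKf dictList "green" with
      | none => simp [List.foldl]
      | some g => simp [List.foldl]
    | some r =>
      cases hg : bKf dictList "green" with
      | none => simp [List.foldl]
      | some g => simp [List.foldl]

-- ===== VERDICT (by name: the statement is the Claim_ definition above) =====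
theorem maxNumbers_spec : Claim_equal_maxNumbers := by
  intro dictList _ hpre
  unfold Spec_maxNumbers
  rw [A_closed dictList hpre, B_closed dictList hpre]
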